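-- pv_equiv track=rewrite | github.com/Programmerryoki/Competitive-Programming | Atcoder/AHC 004/A_OtherPerson.py | can_put_v
-- ===== SOURCE A (Python) =====
-- def can_put_v(s, field, ind, i, j, N=20):
--     # 縦横向
--     ret = True
--     for y in range(N):
--         if (
--                 s[(ind + y) % N] == "."
--                 or field[i][(j + y) % N] == "."
--                 or s[(ind + y) % N] == field[i][(j + y) % N]
--         ):
--             continue
--         else:
--             ret = False
--     if ret:
--         for y in range(N):
--             if field[i][(j + y) % N] == ".":
--                 field[i][(j + y) % N] = s[(ind + y) % N]
--             else:
--                 continue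
--
--     return ret
-- ===== SOURCE B (Python) =====
-- def can_put_v(s, field, ind, i, j, N=20):
--     # Rotation view: compare the cyclic shift of s against the cyclic shift of the
--     # row with zip/all (no per-step modular indexing), then rebuild the row prefix
--     # in one comprehension, keeping non-'.' cells.
--     if N <= 0:
--         return True
--     ind %= N
--     j %= N
--     row = field[i]
--     srot = s[ind:N] + s[:ind]
--     rrot = row[j:N] + row[:j]
--     ok = all(a == "." or b == "." or a == b for a, b in zip(srot, rrot))
--     if ok:
--         row[:N] = [srot[(p - j) % N] if c == "." else c for p, c in enumerate(row[:N])]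
--     return ok
-- ===== Notes on version B (the rewrite author's own statement) =====
-- stated objective: alternative
-- what changed: A loops over indices twice computing a modular index per step (one pass to test, a second rescanning pass to write); B slices the cyclic rotations of the string and of the row once, tests compatibility by a zip/all comparison of the two rotated sequences, and rebuilds the row prefix in a single comprehension.
-- outside the precondition, e.g. on can_put_v('a.', [['b']], 0, 0, 0, 2): A returns False, B returns False
import Mathlib
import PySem

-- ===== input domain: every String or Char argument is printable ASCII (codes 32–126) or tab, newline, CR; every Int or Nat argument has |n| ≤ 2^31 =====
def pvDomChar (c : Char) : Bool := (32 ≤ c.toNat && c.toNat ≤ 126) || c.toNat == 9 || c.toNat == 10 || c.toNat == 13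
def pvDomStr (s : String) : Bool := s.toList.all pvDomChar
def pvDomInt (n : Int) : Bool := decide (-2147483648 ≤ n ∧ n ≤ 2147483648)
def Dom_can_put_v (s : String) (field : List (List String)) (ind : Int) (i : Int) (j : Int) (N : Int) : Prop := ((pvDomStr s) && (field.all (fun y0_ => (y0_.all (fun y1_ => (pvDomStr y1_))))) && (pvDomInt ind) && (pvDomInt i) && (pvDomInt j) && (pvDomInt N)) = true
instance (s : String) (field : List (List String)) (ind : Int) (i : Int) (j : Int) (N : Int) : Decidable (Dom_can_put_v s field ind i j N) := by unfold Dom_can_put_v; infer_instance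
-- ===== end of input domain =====

-- B replaces A's two modular-index loops by slicing the cyclic rotations of the string and of
-- the row and comparing them with zip/all; equivalence is about the RETURN value only (both
-- Pythons mutate field[i] identically when the string fits).


-- ===== PORT A =====
-- s[k] in Python yields a 1-character string; we port it as that string (Pre_ excludes the none case).
def pvCharAt (s : String) (k : Int) : String :=
  ((PySem.Str.pyGet? s k).map (fun c => String.ofList [c])).getD ""

-- literal port of A: first loop computes ret by modular indexing; A's second loop only mutates
-- field[i] (unobservable in the return value), so the port returns ret.
def can_put_v (s : String) (field : List (List String)) (ind : Int) (i : Int) (j : Int) (N : Int) : Bool :=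
  (PySem.List.pyRange 0 N 1).foldl
    (fun ret y =>
      if pvCharAt s (PySem.Int.mod (ind + y) N) == "."
          || PySem.List.pyGetD (PySem.List.pyGetD field i []) (PySem.Int.mod (j + y) N) "" == "."
          || pvCharAt s (PySem.Int.mod (ind + y) N)
              == PySem.List.pyGetD (PySem.List.pyGetD field i []) (PySem.Int.mod (j + y) N) ""
      then ret else false)
    true

-- ===== PORT B =====
-- literal port of B: build the two cyclic rotations by slicing (string facts on the .toList
-- side, as PySem prescribes) and compare them with zip/all; B's write-back comprehension only
-- mutates field[i] and does not affect the return value, which is ok.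
def can_put_v_alt (s : String) (field : List (List String)) (ind : Int) (i : Int) (j : Int) (N : Int) : Bool :=
  if N ≤ 0 then true
  else
    let ind' := PySem.Int.mod ind N
    let j' := PySem.Int.mod j N
    let row := PySem.List.pyGetD field i []
    let srot := PySem.List.slice s.toList (some ind') (some N) ++ PySem.List.slice s.toList (some 0) (some ind')
    let rrot := PySem.List.slice row (some j') (some N) ++ PySem.List.slice row (some 0) (some j')
    (List.zip srot rrot).all
      (fun ab => String.ofList [ab.1] == "." || ab.2 == "." || String.ofList [ab.1] == ab.2)

-- ===== PRECONDITION & SPEC =====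
-- Pre_ excludes exactly the inputs where Python indexing can raise: for N > 0 the wrapped indices
-- cover 0..N-1, so s must have length ≥ N and field[i] must exist with length ≥ N. This slightly
-- narrows A's domain: when its `or` short-circuits, A can return False over a missing/short row
-- without ever touching the out-of-range cells (see the cite); B's zip truncates there instead.
def Pre_can_put_v (s : String) (field : List (List String)) (ind : Int) (i : Int) (j : Int) (N : Int) : Prop :=
  N ≤ 0 ∨ (N ≤ PySem.Str.len s ∧
    ((PySem.List.pyGet? field i).map (fun row => decide (N ≤ (row.length : Int)))).getD false = true)
instance (s : String) (field : List (List String)) (ind : Int) (i : Int) (j : Int) (N : Int) : Decidable (Pre_can_put_v s field ind i j N) := by unfold Pre_can_put_v; infer_instance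

def pvWitness_can_put_v : String × List (List String) × Int × Int × Int × Int :=
  ("ab", [["a", "."]], 0, 0, 0, 2)

def Spec_can_put_v (s : String) (field : List (List String)) (ind : Int) (i : Int) (j : Int) (N : Int) (out : Bool) : Prop := out = can_put_v_alt s field ind i j N
instance (s : String) (field : List (List String)) (ind : Int) (i : Int) (j : Int) (N : Int) (out : Bool) : Decidable (Spec_can_put_v s field ind i j N out) := by unfold Spec_can_put_v; infer_instance

-- ===== CLAIM (what is proved, stated in full; the proofs are below) =====
def Claim_equal_can_put_v : Prop := ∀ (s : String) (field : List (List String)) (ind : Int) (i : Int) (j : Int) (N : Int), Dom_can_put_v s field ind i j N → Pre_can_put_v s field ind i j N → Spec_can_put_v s field ind i j N (can_put_v s field ind i j N)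

-- ===== LEMMAS AND PROOFS =====

-- A's accumulator loop is an `all`.
theorem pv_foldl_if_all (c : Int → Bool) :
    ∀ (l : List Int) (b : Bool),
      l.foldl (fun ret y => if c y then ret else false) b = (b && l.all c) := by
  intro l
  induction l with
  | nil => intro b; simp
  | cons y t ih =>
    intro b
    simp only [List.foldl_cons, List.all_cons]
    rw [ih]
    cases h : c y <;> cases b <;> simp [h]

-- The rotation slice is a map of modular lookups over range n.
theorem pv_rot_eq_map {α : Type} (l : List α) (d : α) (a n : Nat)
    (ha : a ≤ n) (hn : n ≤ l.length) :
    (l.drop a).take (n - a) ++ l.take a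
      = (List.range n).map (fun k => l.getD ((a + k) % n) d) := by
  apply List.ext_getElem
  · simp; omega
  · intro k hk hk'
    have hkn : k < n := by simp at hk'; omega
    have hlen : ((l.drop a).take (n - a)).length = n - a := by simp; omega
    rw [List.getElem_map, List.getElem_range]
    by_cases hcase : k < n - a
    · rw [List.getElem_append_left (by omega)]
      have hm : (a + k) % n = a + k := Nat.mod_eq_of_lt (by omega)
      rw [List.getElem_take, List.getElem_drop, hm,
        List.getD_eq_getElem l d (by omega)]
    · rw [List.getElem_append_right (by omega)]
      have hm : (a + k) % n = a + k - n := by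
        rw [Nat.mod_eq_sub_mod (by omega), Nat.mod_eq_of_lt (by omega)]
      rw [List.getElem_take, hm, List.getD_eq_getElem l d (by omega)]
      congr 1
      omega

-- The wrapped Python index (x + k) % N, rewritten as a Nat index, for 0 < N.
theorem pv_mod_shift (x : Int) (n : Nat) (k : Nat) (hn : 0 < n) :
    PySem.Int.mod (x + (k : Int)) (n : Int)
      = (((PySem.Int.mod x (n : Int)).toNat + k) % n : Nat) := by
  have hpos : (0 : Int) < (n : Int) := by exact_mod_cast hn
  rw [PySem.Int.mod_eq_emod_of_pos hpos, PySem.Int.mod_eq_emod_of_pos hpos]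
  have hx : ((x % (n : Int)).toNat : Int) = x % (n : Int) :=
    Int.toNat_of_nonneg (Int.emod_nonneg x (by omega))
  push_cast
  rw [hx, Int.emod_add_emod]

-- ===== VERDICT (by name: the statement is the Claim_ definition above) =====
theorem can_put_v_spec : Claim_equal_can_put_v := by
  intro s field ind i j N _ hpre
  unfold Spec_can_put_v
  simp only [can_put_v, can_put_v_alt]
  by_cases hN : N ≤ 0
  · simp [hN, PySem.List.pyRange_one_eq_nil hN]
  · have hNpos : 0 < N := by omega
    unfold Pre_can_put_v at hpre
    rcases hpre with h | ⟨hs, hrow⟩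
    · omega
    have hrow' : N ≤ ((PySem.List.pyGetD field i []).length : Int) := by
      rcases h : PySem.List.pyGet? field i with _ | r
      · simp [h] at hrow
      · have hgd : PySem.List.pyGetD field i [] = r := by simp [PySem.List.pyGetD, h]
        simp [h] at hrow
        rw [hgd]; exact_mod_cast hrow
    set row := PySem.List.pyGetD field i [] with hrowdef
    set n := N.toNat with hn
    have hNn : ((n : Int)) = N := by omega
    have hsl : n ≤ s.toList.length := by
      rw [PySem.Str.len_eq] at hs; omega
    have hrl : n ≤ row.length := by omega
    have hnpos : 0 < n := by omega
    have hia0 : 0 ≤ PySem.Int.mod ind N := PySem.Int.mod_nonneg ind hNpos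
    have hia1 : PySem.Int.mod ind N < N := PySem.Int.mod_lt ind hNpos
    have hja0 : 0 ≤ PySem.Int.mod j N := PySem.Int.mod_nonneg j hNpos
    have hja1 : PySem.Int.mod j N < N := PySem.Int.mod_lt j hNpos
    set a := (PySem.Int.mod ind N).toNat with hadef
    set b := (PySem.Int.mod j N).toNat with hbdef
    have hma : PySem.Int.mod ind N = (a : Int) := by omega
    have hmb : PySem.Int.mod j N = (b : Int) := by omega
    have han : a ≤ n := by omega
    have hbn : b ≤ n := by omega
    rw [if_neg hN, hma, hmb, ← hNn]
    have h0 : (0 : Int) = ((0 : Nat) : Int) := rfl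
    rw [h0, PySem.List.slice_natCast, PySem.List.slice_natCast,
        PySem.List.slice_natCast, PySem.List.slice_natCast]
    simp only [Nat.sub_zero, List.drop_zero]
    rw [pv_rot_eq_map s.toList ' ' a n han hsl, pv_rot_eq_map row "" b n hbn hrl,
        List.zip_map', List.all_map]
    rw [pv_foldl_if_all, Bool.true_and, PySem.List.pyRange_one, List.all_map]
    simp only [Nat.cast_zero, Int.sub_zero, Int.toNat_natCast]
    congr 1
    funext k
    simp only [Function.comp_apply, zero_add]
    have hadef' : (PySem.Int.mod ind ((n : Nat) : Int)).toNat = a := by rw [hNn]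
    have hbdef' : (PySem.Int.mod j ((n : Nat) : Int)).toNat = b := by rw [hNn]
    rw [pv_mod_shift ind n k hnpos, pv_mod_shift j n k hnpos, hadef', hbdef']
    have hmlt : (a + k) % n < s.toList.length :=
      lt_of_lt_of_le (Nat.mod_lt _ hnpos) hsl
    rw [PySem.List.pyGetD_natCast]
    unfold pvCharAt
    rw [PySem.Str.pyGet?_natCast, List.getElem?_eq_getElem hmlt,
        List.getD_eq_getElem s.toList ' ' hmlt]
    rfl
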